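-- pv_equiv track=rewrite | github.com/Blanchette95/PythonScripts | TestCodes.py | adfgx_encrypt
-- ===== SOURCE A (Python) =====
-- def create_square(string, cipher):
--     col = {cipher[i]:string[i::5] for i in range(len(cipher))}
--     row = {cipher[i]:string[i*5:i*5+5] for i in range(len(cipher))}
--     return row, col
--
-- def adfgx_encrypt(plaintext, square):
--     cipher = 'ADFGX'
--     ciphertext = []
--     row, col = create_square(square, cipher)
--     for letter in plaintext:
--         ciphertext += [key for key in row if letter in row[key]]
--         ciphertext += [key for key in col if letter in col[key]]
--     return ''.join(ciphertext)
-- ===== SOURCE B (Python) =====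
-- def adfgx_encrypt(plaintext, square):
--     cipher = 'ADFGX'
--     coords = {}
--     for p, ch in enumerate(square):
--         r, c = divmod(p, 5)
--         rows, cols = coords.setdefault(ch, (set(), set()))
--         rows.add(r)
--         cols.add(c)
--     out = []
--     for letter in plaintext:
--         rows, cols = coords.get(letter, (set(), set()))
--         out += [cipher[r] for r in sorted(rows)]
--         out += [cipher[c] for c in sorted(cols)]
--     return ''.join(out)
-- ===== Notes on version B (the rewrite author's own statement) =====
-- stated objective: alternative
-- what changed: B builds, in one pass over square, a dict mapping each character to its sets of row/column indices via divmod(p,5), then emits cipher letters from the sorted sets per plaintext letter, instead of A's per-letter membership scan of five row strings and five column strings; Pre_ excludes inputs where a plaintext character occurs in square beyond position 24, where A's 25-character row slices accidentally yield a column letter without a row letter and B's row index is out of the cipher's range (IndexError).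
-- outside the precondition, e.g. on adfgx_encrypt('Z', 'ABCDEFGHIKLMNOPQRSTUVWXYZZ'): A returns 'XAX', B raises IndexError
import Mathlib
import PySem

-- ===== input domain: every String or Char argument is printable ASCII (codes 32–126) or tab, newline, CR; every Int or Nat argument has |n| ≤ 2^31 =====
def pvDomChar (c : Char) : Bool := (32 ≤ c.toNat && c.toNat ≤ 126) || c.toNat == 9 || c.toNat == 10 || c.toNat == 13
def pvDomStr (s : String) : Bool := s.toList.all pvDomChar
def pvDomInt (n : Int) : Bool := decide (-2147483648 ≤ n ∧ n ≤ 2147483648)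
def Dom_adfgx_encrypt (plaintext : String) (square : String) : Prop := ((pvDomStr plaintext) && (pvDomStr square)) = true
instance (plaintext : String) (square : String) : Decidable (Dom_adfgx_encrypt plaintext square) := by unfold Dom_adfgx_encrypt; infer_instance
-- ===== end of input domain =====

-- B replaces A's per-letter membership scan of five row strings and five column strings by a
-- one-pass divmod coordinate index over `square` plus a per-letter lookup (objective: alternative).

-- ===== PORT A =====
-- create_square: two dict comprehensions over range(len(cipher)); 'string[i::5]' is slice?
-- with step 5 (step ≠ 0, so the .getD [] default never fires); cipher[i] via pyGet? (i always
-- in range, so the .getD ' ' default never fires).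
def pv_create_square (s : List Char) : PySem.Dict Char (List Char) × PySem.Dict Char (List Char) :=
  let cipher : List Char := ['A', 'D', 'F', 'G', 'X']
  let col : PySem.Dict Char (List Char) :=
    (PySem.List.pyRange 0 (cipher.length : Int)).foldl
      (fun d i => d.insert ((PySem.List.pyGet? cipher i).getD ' ')
        ((PySem.List.slice? s (some i) none 5).getD [])) ⟨[]⟩
  let row : PySem.Dict Char (List Char) :=
    (PySem.List.pyRange 0 (cipher.length : Int)).foldl
      (fun d i => d.insert ((PySem.List.pyGet? cipher i).getD ' ')
        (PySem.List.slice s (some (i * 5)) (some (i * 5 + 5)))) ⟨[]⟩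
  (row, col)

-- 'letter in row[key]' with letter a single char is exactly char membership (isIn [letter]);
-- row[key] is kv.2 since the dict keys 'A','D','F','G','X' are distinct; the list comprehension
-- over a dict iterates items in insertion order; ''.join of the 1-char keys is String.ofList.
def adfgx_encrypt (plaintext : String) (square : String) : String :=
  let rc := pv_create_square square.toList
  String.ofList (plaintext.toList.foldl (fun acc letter =>
    (acc ++ (rc.1.items.filter (fun kv => PySem.Chars.isIn [letter] kv.2)).map Prod.fst)
      ++ (rc.2.items.filter (fun kv => PySem.Chars.isIn [letter] kv.2)).map Prod.fst) [])

-- ===== PORT B =====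
-- one step of B's indexing loop: r, c = divmod(p, 5); setdefault + in-place set mutation
-- = getD then insert back
def pvIndexStep (d : PySem.Dict Char (PySem.Set Int × PySem.Set Int)) (pc : Int × Char) :
    PySem.Dict Char (PySem.Set Int × PySem.Set Int) :=
  let rc := d.getD pc.2 ([], [])
  d.insert pc.2 (rc.1.add (PySem.Int.floordiv pc.1 5), rc.2.add (PySem.Int.mod pc.1 5))

-- cipher[r] via pyGet? (under Pre_ every row/col index is in range, so .getD ' ' never fires)
def adfgx_encrypt_alt (plaintext : String) (square : String) : String :=
  let coords := (PySem.List.enumerate square.toList).foldl pvIndexStep ⟨[]⟩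
  String.ofList (plaintext.toList.foldl (fun acc letter =>
    let rc := coords.getD letter ([], [])
    (acc ++ (PySem.List.sorted rc.1 id).map
        (fun r => (PySem.List.pyGet? ['A', 'D', 'F', 'G', 'X'] r).getD ' '))
      ++ (PySem.List.sorted rc.2 id).map
        (fun c => (PySem.List.pyGet? ['A', 'D', 'F', 'G', 'X'] c).getD ' ')) [])

-- ===== PRECONDITION & SPEC =====
-- Pre_ excludes inputs where some plaintext character occurs in square past position 24:
-- there A's row table (built only from the first 25 characters) accidentally emits a column
-- letter with no row letter, while B's row index p//5 ≥ 5 makes cipher[r] raise IndexError.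
def Pre_adfgx_encrypt (plaintext : String) (square : String) : Prop :=
  (plaintext.toList.all (fun c => !((square.toList.drop 25).contains c))) = true
instance (plaintext : String) (square : String) : Decidable (Pre_adfgx_encrypt plaintext square) := by
  unfold Pre_adfgx_encrypt; infer_instance

def pvWitness_adfgx_encrypt : String × String := ("HI", "ABCDE")

def Spec_adfgx_encrypt (plaintext : String) (square : String) (out : String) : Prop := out = adfgx_encrypt_alt plaintext square
instance (plaintext : String) (square : String) (out : String) : Decidable (Spec_adfgx_encrypt plaintext square out) := by unfold Spec_adfgx_encrypt; infer_instance

-- ===== CLAIM (what is proved, stated in full; the proofs are below) =====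
def Claim_equal_adfgx_encrypt : Prop := ∀ (plaintext : String) (square : String), Dom_adfgx_encrypt plaintext square → Pre_adfgx_encrypt plaintext square → Spec_adfgx_encrypt plaintext square (adfgx_encrypt plaintext square)

-- ===== LEMMAS AND PROOFS =====

-- A's two dicts, written out (5 inserts with the distinct literal keys)
theorem pv_create_square_eq (s : List Char) : pv_create_square s =
    (⟨[('A', PySem.List.slice s (some 0) (some 5)),
       ('D', PySem.List.slice s (some 5) (some 10)),
       ('F', PySem.List.slice s (some 10) (some 15)),
       ('G', PySem.List.slice s (some 15) (some 20)),
       ('X', PySem.List.slice s (some 20) (some 25))]⟩,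
     ⟨[('A', (PySem.List.slice? s (some 0) none 5).getD []),
       ('D', (PySem.List.slice? s (some 1) none 5).getD []),
       ('F', (PySem.List.slice? s (some 2) none 5).getD []),
       ('G', (PySem.List.slice? s (some 3) none 5).getD []),
       ('X', (PySem.List.slice? s (some 4) none 5).getD [])]⟩) := by
  rfl

theorem pv_mem_slice (s : List Char) (a b : Nat) (c : Char) :
    c ∈ PySem.List.slice s (some (a : Int)) (some (b : Int)) ↔
      ∃ p : Nat, a ≤ p ∧ p < b ∧ p < s.length ∧ s[p]? = some c := by
  simp only [PySem.List.slice, PySem.List.clampIdx]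
  have h0 : ¬ ((a:Int) < 0) := by omega
  have h1 : ¬ ((b:Int) < 0) := by omega
  simp only [h0, h1, if_false, Int.toNat_natCast]
  rw [List.mem_iff_getElem]
  constructor
  · rintro ⟨j, hj, hc⟩
    simp only [List.length_take, List.length_drop] at hj
    refine ⟨min a s.length + j, by omega, by omega, by omega, ?_⟩
    rw [List.getElem_take, List.getElem_drop] at hc
    rw [List.getElem?_eq_getElem (by omega)]
    simpa using hc
  · rintro ⟨p, hap, hpb, hps, hc⟩
    rw [List.getElem?_eq_getElem hps] at hc
    refine ⟨p - min a s.length, by simp only [List.length_take, List.length_drop]; omega, ?_⟩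
    rw [List.getElem_take, List.getElem_drop]
    simp only [Option.some.injEq] at hc
    convert hc using 2
    omega

theorem pv_mem_slice5 (s : List Char) (i : Nat) (hi : i < 5) (c : Char) :
    c ∈ (PySem.List.slice? s (some (i : Int)) none 5).getD [] ↔
      ∃ p : Nat, p < s.length ∧ p % 5 = i ∧ s[p]? = some c := by
  simp only [PySem.List.slice?, PySem.List.sliceIndices]
  norm_num
  have hnn : ¬ ((i:Int) < 0) := by omega
  simp only [hnn, if_false]
  constructor
  · rintro ⟨k, hk, hc⟩
    split_ifs at hk with hlt
    · have hse : (min (i:Int) (s.length:Int)) = (i:Int) := by omega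
      rw [hse] at hk hc
      refine ⟨i + 5 * k, ?_, by omega, ?_⟩
      · obtain ⟨h, _⟩ := List.getElem?_eq_some_iff.mp hc
        omega
      · convert hc using 2
    · omega
  · rintro ⟨p, hp, hm, hc⟩
    have hlt : (min (i:Int) (s.length:Int)) < (s.length:Int) := by omega
    have hse : (min (i:Int) (s.length:Int)) = (i:Int) := by omega
    refine ⟨(p - i) / 5, ?_, ?_⟩
    · rw [if_pos hlt, hse]
      omega
    · rw [hse]
      convert hc using 2
      omega

theorem pv_step_mem1 (d : PySem.Dict Char (PySem.Set Int × PySem.Set Int)) (k : Int) (x ch : Char) (r : Int) :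
    r ∈ ((pvIndexStep d (k, x)).getD ch ([], [])).1 ↔
      r ∈ (d.getD ch ([], [])).1 ∨ (ch = x ∧ r = k / 5) := by
  unfold pvIndexStep
  by_cases h : ch = x
  · subst h
    rw [PySem.Dict.getD_insert_self]
    simp [PySem.Set.mem_add]
  · rw [PySem.Dict.getD_insert]
    simp [h]

theorem pv_step_mem2 (d : PySem.Dict Char (PySem.Set Int × PySem.Set Int)) (k : Int) (x ch : Char) (r : Int) :
    r ∈ ((pvIndexStep d (k, x)).getD ch ([], [])).2 ↔
      r ∈ (d.getD ch ([], [])).2 ∨ (ch = x ∧ r = k % 5) := by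
  unfold pvIndexStep
  by_cases h : ch = x
  · subst h
    rw [PySem.Dict.getD_insert_self]
    simp [PySem.Set.mem_add]
  · rw [PySem.Dict.getD_insert]
    simp [h]

theorem pv_idx_mem (s : List Char) : ∀ (k : Nat) (d : PySem.Dict Char (PySem.Set Int × PySem.Set Int)) (ch : Char),
    (∀ r : Int, r ∈ (((PySem.List.enumerate s (k : Int)).foldl pvIndexStep d).getD ch ([], [])).1 ↔
      (r ∈ (d.getD ch ([], [])).1 ∨ ∃ j : Nat, j < s.length ∧ s[j]? = some ch ∧ r = ((k + j : Nat) : Int) / 5))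
    ∧ (∀ c : Int, c ∈ (((PySem.List.enumerate s (k : Int)).foldl pvIndexStep d).getD ch ([], [])).2 ↔
      (c ∈ (d.getD ch ([], [])).2 ∨ ∃ j : Nat, j < s.length ∧ s[j]? = some ch ∧ c = ((k + j : Nat) : Int) % 5)) := by
  induction s with
  | nil => intro k d ch; simp [PySem.List.enumerate]
  | cons x t ih =>
    intro k d ch
    have hcast : (k : Int) + 1 = ((k + 1 : Nat) : Int) := by push_cast; ring
    simp only [PySem.List.enumerate, List.foldl_cons, hcast]
    obtain ⟨ih1, ih2⟩ := ih (k + 1) (pvIndexStep d ((k : Int), x)) ch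
    constructor
    · intro r
      rw [ih1, pv_step_mem1]
      constructor
      · rintro ((hd | ⟨rfl, hr⟩) | ⟨j, hj, hget, hr⟩)
        · exact Or.inl hd
        · exact Or.inr ⟨0, by simp, by simp, by subst hr; rfl⟩
        · exact Or.inr ⟨j + 1, by simp; omega, by simpa using hget,
            by subst hr; congr 1; push_cast; omega⟩
      · rintro (hd | ⟨j, hj, hget, hr⟩)
        · exact Or.inl (Or.inl hd)
        · cases j with
          | zero =>
            simp only [List.getElem?_cons_zero, Option.some.injEq] at hget
            exact Or.inl (Or.inr ⟨hget.symm, by subst hr; rfl⟩)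
          | succ j =>
            simp only [List.length_cons] at hj
            exact Or.inr ⟨j, by omega, by simpa using hget,
              by subst hr; congr 1; push_cast; omega⟩
    · intro r
      rw [ih2, pv_step_mem2]
      constructor
      · rintro ((hd | ⟨rfl, hr⟩) | ⟨j, hj, hget, hr⟩)
        · exact Or.inl hd
        · exact Or.inr ⟨0, by simp, by simp, by subst hr; rfl⟩
        · exact Or.inr ⟨j + 1, by simp; omega, by simpa using hget,
            by subst hr; congr 1; push_cast; omega⟩
      · rintro (hd | ⟨j, hj, hget, hr⟩)
        · exact Or.inl (Or.inl hd)
        · cases j with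
          | zero =>
            simp only [List.getElem?_cons_zero, Option.some.injEq] at hget
            exact Or.inl (Or.inr ⟨hget.symm, by subst hr; rfl⟩)
          | succ j =>
            simp only [List.length_cons] at hj
            exact Or.inr ⟨j, by omega, by simpa using hget,
              by subst hr; congr 1; push_cast; omega⟩

theorem pv_step_nodup (d : PySem.Dict Char (PySem.Set Int × PySem.Set Int)) (k : Int) (x : Char)
    (h : ∀ ch : Char, (d.getD ch ([], [])).1.Nodup ∧ (d.getD ch ([], [])).2.Nodup) :
    ∀ ch : Char, ((pvIndexStep d (k, x)).getD ch ([], [])).1.Nodup ∧ ((pvIndexStep d (k, x)).getD ch ([], [])).2.Nodup := by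
  intro ch
  unfold pvIndexStep
  by_cases hc : ch = x
  · subst hc
    rw [PySem.Dict.getD_insert_self]
    exact ⟨PySem.Set.nodup_add _ _ (h ch).1, PySem.Set.nodup_add _ _ (h ch).2⟩
  · rw [PySem.Dict.getD_insert]
    simp only [hc, if_false]
    exact h ch

theorem pv_idx_nodup (s : List Char) : ∀ (k : Int) (d : PySem.Dict Char (PySem.Set Int × PySem.Set Int)),
    (∀ ch : Char, (d.getD ch ([], [])).1.Nodup ∧ (d.getD ch ([], [])).2.Nodup) →
    ∀ ch : Char, (((PySem.List.enumerate s k).foldl pvIndexStep d).getD ch ([], [])).1.Nodup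
      ∧ (((PySem.List.enumerate s k).foldl pvIndexStep d).getD ch ([], [])).2.Nodup := by
  induction s with
  | nil => intro k d h ch; simpa [PySem.List.enumerate] using h ch
  | cons x t ih =>
    intro k d h ch
    simp only [PySem.List.enumerate, List.foldl_cons]
    exact ih (k + 1) (pvIndexStep d (k, x)) (pv_step_nodup d k x h) ch

theorem pv_sorted_eq_filter (R : List Int) (h : R.Nodup) (hb : ∀ r ∈ R, 0 ≤ r ∧ r < 5) :
    PySem.List.sorted R id = ([0, 1, 2, 3, 4] : List Int).filter (fun i => decide (i ∈ R)) := by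
  apply PySem.List.sorted_eq_of_perm_of_pairwise_lt
  · rw [List.perm_ext_iff_of_nodup (List.Nodup.filter _ (by decide)) h]
    intro a
    simp only [List.mem_filter, decide_eq_true_eq]
    constructor
    · rintro ⟨_, ha⟩; exact ha
    · intro ha
      have := hb a ha
      refine ⟨by simp; omega, ha⟩
  · exact List.Pairwise.filter _ (by decide)

def pvIdx (s : List Char) : PySem.Dict Char (PySem.Set Int × PySem.Set Int) :=
  (PySem.List.enumerate s).foldl pvIndexStep ⟨[]⟩

theorem pv_singleton_infix {c : Char} {l : List Char} : [c] <:+: l ↔ c ∈ l := by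
  constructor
  · intro h
    exact List.singleton_sublist.mp h.sublist
  · intro h
    obtain ⟨u, w, rfl⟩ := List.append_of_mem h
    exact ⟨u, w, by simp⟩

theorem pvIdx_mem1 (s : List Char) (letter : Char) (r : Int) :
    r ∈ ((pvIdx s).getD letter ([], [])).1 ↔
      ∃ j : Nat, j < s.length ∧ s[j]? = some letter ∧ r = (j : Int) / 5 := by
  have h := (pv_idx_mem s 0 ⟨[]⟩ letter).1 r
  simpa [pvIdx, PySem.Dict.getD, PySem.Dict.get?] using h

theorem pvIdx_mem2 (s : List Char) (letter : Char) (c : Int) :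
    c ∈ ((pvIdx s).getD letter ([], [])).2 ↔
      ∃ j : Nat, j < s.length ∧ s[j]? = some letter ∧ c = (j : Int) % 5 := by
  have h := (pv_idx_mem s 0 ⟨[]⟩ letter).2 c
  simpa [pvIdx, PySem.Dict.getD, PySem.Dict.get?] using h

theorem pv_cond_row (s : List Char) (letter : Char) (i : Nat) (a b j : Int) (_hi : i < 5)
    (ha : a = i * 5) (hb : b = i * 5 + 5) (hj : j = i) :
    PySem.Chars.isIn [letter] (PySem.List.slice s (some a) (some b))
      = decide (j ∈ ((pvIdx s).getD letter ([], [])).1) := by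
  subst ha hb hj
  rw [Bool.eq_iff_iff, decide_eq_true_eq, PySem.Chars.isIn_iff_infix, pv_singleton_infix]
  have hsl := pv_mem_slice s (i * 5) (i * 5 + 5) letter
  push_cast at hsl
  rw [hsl, pvIdx_mem1]
  constructor
  · rintro ⟨p, h1, h2, h3, h4⟩
    exact ⟨p, h3, h4, by omega⟩
  · rintro ⟨j, h1, h2, h3⟩
    refine ⟨j, by omega, by omega, h1, h2⟩

theorem pv_cond_col (s : List Char) (letter : Char) (i : Nat) (a j : Int) (hi : i < 5)
    (ha : a = i) (hj : j = i) :
    PySem.Chars.isIn [letter] ((PySem.List.slice? s (some a) none 5).getD [])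
      = decide (j ∈ ((pvIdx s).getD letter ([], [])).2) := by
  subst ha hj
  rw [Bool.eq_iff_iff, decide_eq_true_eq, PySem.Chars.isIn_iff_infix, pv_singleton_infix]
  rw [pv_mem_slice5 s i hi, pvIdx_mem2]
  constructor
  · rintro ⟨p, h1, h2, h3⟩
    exact ⟨p, h1, h3, by omega⟩
  · rintro ⟨j, h1, h2, h3⟩
    refine ⟨j, h1, by omega, h2⟩

-- per-letter equality of A's contribution and B's contribution (letter not in square[25:])
theorem pv_contrib (s : List Char) (letter : Char) (hpre : letter ∉ s.drop 25) :
    ((pv_create_square s).1.items.filter (fun kv => PySem.Chars.isIn [letter] kv.2)).map Prod.fst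
      ++ ((pv_create_square s).2.items.filter (fun kv => PySem.Chars.isIn [letter] kv.2)).map Prod.fst
    = ((PySem.List.sorted ((pvIdx s).getD letter ([], [])).1 id).map
          (fun r => (PySem.List.pyGet? ['A', 'D', 'F', 'G', 'X'] r).getD ' '))
        ++ ((PySem.List.sorted ((pvIdx s).getD letter ([], [])).2 id).map
          (fun c => (PySem.List.pyGet? ['A', 'D', 'F', 'G', 'X'] c).getD ' ')) := by
  have hnd : ((pvIdx s).getD letter ([], [])).1.Nodup ∧ ((pvIdx s).getD letter ([], [])).2.Nodup :=
    pv_idx_nodup s 0 ⟨[]⟩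
      (fun ch => by constructor <;> simp [PySem.Dict.getD, PySem.Dict.get?]) letter
  have hbR : ∀ r ∈ ((pvIdx s).getD letter ([], [])).1, 0 ≤ r ∧ r < 5 := by
    intro r hr
    rw [pvIdx_mem1] at hr
    obtain ⟨j, hj, hget, rfl⟩ := hr
    have hj25 : j < 25 := by
      by_contra h25
      have hj' : (s.drop 25)[j - 25]? = some letter := by
        rw [List.getElem?_drop]
        have he : 25 + (j - 25) = j := by omega
        rw [he]; exact hget
      exact hpre (List.mem_of_getElem? hj')
    omega
  have hbC : ∀ c ∈ ((pvIdx s).getD letter ([], [])).2, 0 ≤ c ∧ c < 5 := by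
    intro c hc
    rw [pvIdx_mem2] at hc
    obtain ⟨j, _, _, rfl⟩ := hc
    omega
  have e1 := pv_sorted_eq_filter _ hnd.1 hbR
  have e2 := pv_sorted_eq_filter _ hnd.2 hbC
  rw [e1, e2, pv_create_square_eq]
  have h0 := pv_cond_row s letter 0 0 5 0 (by norm_num) (by norm_num) (by norm_num) (by norm_num)
  have h1 := pv_cond_row s letter 1 5 10 1 (by norm_num) (by norm_num) (by norm_num) (by norm_num)
  have h2 := pv_cond_row s letter 2 10 15 2 (by norm_num) (by norm_num) (by norm_num) (by norm_num)
  have h3 := pv_cond_row s letter 3 15 20 3 (by norm_num) (by norm_num) (by norm_num) (by norm_num)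
  have h4 := pv_cond_row s letter 4 20 25 4 (by norm_num) (by norm_num) (by norm_num) (by norm_num)
  have c0 := pv_cond_col s letter 0 0 0 (by norm_num) (by norm_num) (by norm_num)
  have c1 := pv_cond_col s letter 1 1 1 (by norm_num) (by norm_num) (by norm_num)
  have c2 := pv_cond_col s letter 2 2 2 (by norm_num) (by norm_num) (by norm_num)
  have c3 := pv_cond_col s letter 3 3 3 (by norm_num) (by norm_num) (by norm_num)
  have c4 := pv_cond_col s letter 4 4 4 (by norm_num) (by norm_num) (by norm_num)
  congr 1
  · simp only [List.filter_cons, List.filter_nil]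
    rw [h0, h1, h2, h3, h4]
    split_ifs <;> rfl
  · simp only [List.filter_cons, List.filter_nil]
    rw [c0, c1, c2, c3, c4]
    split_ifs <;> rfl

theorem pv_main (pt sq : List Char) (hpre : ∀ c ∈ pt, c ∉ sq.drop 25) : ∀ acc : List Char,
    List.foldl
        (fun acc letter =>
          acc ++
              List.map Prod.fst
                (List.filter (fun kv => PySem.Chars.isIn [letter] kv.2) (pv_create_square sq).1.items) ++
            List.map Prod.fst
              (List.filter (fun kv => PySem.Chars.isIn [letter] kv.2) (pv_create_square sq).2.items))
        acc pt =
      List.foldl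
        (fun acc letter =>
          acc ++
              (PySem.List.sorted (((List.foldl pvIndexStep ⟨[]⟩ (PySem.List.enumerate sq)).getD letter ([], []))).1 id).map
                (fun r => (PySem.List.pyGet? ['A', 'D', 'F', 'G', 'X'] r).getD ' ') ++
            (PySem.List.sorted (((List.foldl pvIndexStep ⟨[]⟩ (PySem.List.enumerate sq)).getD letter ([], []))).2 id).map
              (fun c => (PySem.List.pyGet? ['A', 'D', 'F', 'G', 'X'] c).getD ' '))
        acc pt := by
  induction pt with
  | nil => intro acc; rfl
  | cons x t ih =>
    intro acc
    simp only [List.foldl_cons]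
    rw [List.append_assoc, List.append_assoc, pv_contrib sq x (hpre x (by simp))]
    exact ih (fun c hc => hpre c (by simp [hc])) _

-- ===== VERDICT (by name: the statement is the Claim_ definition above) =====
theorem adfgx_encrypt_spec : Claim_equal_adfgx_encrypt := by
  intro plaintext square _ hpre
  unfold Pre_adfgx_encrypt at hpre
  rw [List.all_eq_true] at hpre
  replace hpre : ∀ c ∈ plaintext.toList, c ∉ square.toList.drop 25 := by
    intro c hc
    simpa using hpre c hc
  unfold Spec_adfgx_encrypt
  simp only [adfgx_encrypt, adfgx_encrypt_alt]
  exact congrArg String.ofList (pv_main plaintext.toList square.toList hpre [])
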